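-- pv_equiv track=rewrite | github.com/RusieckiRoland/LocalAI-RAG | dotnet_sumarizer/code_compressor.py | _strip_attributes
-- ===== SOURCE A (Python) =====
-- from typing import List, Dict, Optional, Tuple, Set
--
-- def _strip_attributes(text: str) -> str:
--     """Remove C# attributes like [Something(...)] including multi-line."""
--     out_lines: List[str] = []
--     in_attr = False
--     depth = 0
--     for raw in text.splitlines():
--         line = raw.rstrip()
--         if not in_attr and line.strip().startswith("["):
--             in_attr = True
--             depth = line.count("[") - line.count("]")
--             if depth <= 0:
--                 in_attr = False
--                 continue
--             continue
--         if in_attr: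
--             depth += line.count("[") - line.count("]")
--             if depth <= 0:
--                 in_attr = False
--             continue
--         out_lines.append(line)
--     return "\n".join(out_lines)
-- ===== SOURCE B (Python) =====
-- def _strip_attributes(text: str) -> str:
--     """Remove C# attribute blocks using a precomputed prefix-sum array of bracket deltas."""
--     lines = [raw.rstrip() for raw in text.splitlines()]
--     pref = [0]
--     t = 0
--     for l in lines:
--         t += l.count("[") - l.count("]")
--         pref.append(t)
--     out = []
--     i = 0
--     n = len(lines)
--     while i < n:
--         if lines[i].strip().startswith("["):
--             # block starting at i ends at the first j with pref[j+1] <= pref[i]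
--             j = i
--             while j < n and pref[j + 1] > pref[i]:
--                 j += 1
--             i = j + 1
--         else:
--             out.append(lines[i])
--             i += 1
--     return "\n".join(out)
-- ===== Notes on version B (the rewrite author's own statement) =====
-- stated objective: alternative
-- what changed: Replaces A's running in_attr/depth state machine with a staged design: one pass precomputes a prefix-sum array of per-line bracket deltas, then an index walk skips each attribute block by jumping to the first position whose prefix sum drops back to the block start's prefix value, with no depth or flag state.
import Mathlib
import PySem

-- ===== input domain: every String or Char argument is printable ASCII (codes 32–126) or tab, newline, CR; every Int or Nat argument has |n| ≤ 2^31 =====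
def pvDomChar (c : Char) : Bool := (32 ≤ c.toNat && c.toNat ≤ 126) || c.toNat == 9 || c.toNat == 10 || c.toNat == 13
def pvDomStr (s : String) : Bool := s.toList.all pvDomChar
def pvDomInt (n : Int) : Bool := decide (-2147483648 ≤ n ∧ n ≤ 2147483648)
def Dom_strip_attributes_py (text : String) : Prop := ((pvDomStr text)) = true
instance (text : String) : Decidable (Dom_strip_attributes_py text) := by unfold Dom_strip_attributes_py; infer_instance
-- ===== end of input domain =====

-- B replaces A's running in_attr/depth state machine by a staged design: a precomputed
-- prefix-sum array of per-line bracket deltas plus an index walk that skips each attribute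
-- block by jumping to where the prefix sum drops back (objective: alternative, same cost).

-- ===== PORT A =====
-- A's per-line flag/depth state machine, as structural recursion over the split lines.
def stripA_go : List String → Bool → Int → List String
  | [], _, _ => []
  | raw :: rest, inAttr, depth =>
    let line := PySem.Str.rstrip raw
    if !inAttr && PySem.Str.startswith (PySem.Str.strip line) "[" then
      let d : Int := (PySem.Str.count line "[" : Int) - (PySem.Str.count line "]" : Int)
      if d ≤ 0 then stripA_go rest false d
      else stripA_go rest true d
    else if inAttr then
      let d : Int := depth + ((PySem.Str.count line "[" : Int) - (PySem.Str.count line "]" : Int))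
      if d ≤ 0 then stripA_go rest false d
      else stripA_go rest true d
    else
      line :: stripA_go rest inAttr depth

def strip_attributes_py (text : String) : String :=
  PySem.Str.join "\n" (stripA_go (PySem.Str.splitlines text) false 0)

-- ===== PORT B =====
def deltaB (line : String) : Int :=
  (PySem.Str.count line "[" : Int) - (PySem.Str.count line "]" : Int)

-- Source B's pref-building for loop: pref = [0]; t = 0; for l in lines: t += delta; pref.append(t)
def buildPref (lines : List String) : List Int :=
  (lines.foldl (fun (st : List Int × Int) l =>
      (st.1 ++ [st.2 + deltaB l], st.2 + deltaB l)) ([0], 0)).1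

-- Source B's inner while loop: advance j while j < n and pref[j+1] > base.
-- (pref[j+1] is always in range in Source B since pref has length n+1; getD is exact here.)
def stripB_findEnd (pref : List Int) (n : Nat) (base : Int) (j : Nat) : Nat :=
  if h : j < n ∧ pref.getD (j + 1) 0 > base then stripB_findEnd pref n base (j + 1) else j
termination_by n - j
decreasing_by omega

-- needed by stripB_main's termination proof
theorem stripB_findEnd_ge (pref : List Int) (n : Nat) (base : Int) (j : Nat) :
    j ≤ stripB_findEnd pref n base j := by
  unfold stripB_findEnd
  split
  · exact le_trans (Nat.le_succ j) (stripB_findEnd_ge pref n base (j + 1))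
  · exact Nat.le_refl j
termination_by n - j
decreasing_by omega

-- Source B's outer while loop over the index i.
def stripB_main (lines : List String) (pref : List Int) (n : Nat) (i : Nat) : List String :=
  if h : i < n then
    if PySem.Str.startswith (PySem.Str.strip (lines.getD i "")) "[" then
      stripB_main lines pref n (stripB_findEnd pref n (pref.getD i 0) i + 1)
    else
      lines.getD i "" :: stripB_main lines pref n (i + 1)
  else []
termination_by n - i
decreasing_by
  · have := stripB_findEnd_ge pref n (pref.getD i 0) i; omega
  · omega

def strip_attributes_py_alt (text : String) : String :=
  let lines := (PySem.Str.splitlines text).map PySem.Str.rstrip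
  let pref := buildPref lines
  PySem.Str.join "\n" (stripB_main lines pref lines.length 0)

-- ===== PRECONDITION & SPEC =====
def Spec_strip_attributes_py (text : String) (out : String) : Prop := out = strip_attributes_py_alt text
instance (text : String) (out : String) : Decidable (Spec_strip_attributes_py text out) := by unfold Spec_strip_attributes_py; infer_instance

-- ===== CLAIM (what is proved, stated in full; the proofs are below) =====
def Claim_equal_strip_attributes_py : Prop := ∀ (text : String), Dom_strip_attributes_py text → Spec_strip_attributes_py text (strip_attributes_py text)

-- ===== LEMMAS AND PROOFS =====

-- Proof-side intermediate program P: list-based block consumption with a running depth.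
def stripP_consume : Int → List String → List String
  | _, [] => []
  | d, l :: rest => if d ≤ 0 then l :: rest else stripP_consume (d + deltaB l) rest

theorem stripP_consume_length (d : Int) (ls : List String) :
    (stripP_consume d ls).length ≤ ls.length := by
  induction ls generalizing d with
  | nil => simp [stripP_consume]
  | cons l rest ih =>
    simp only [stripP_consume]
    split
    · simp
    · exact Nat.le_succ_of_le (ih _)

def stripP_go : List String → List String
  | [] => []
  | line :: rest =>
    if PySem.Str.startswith (PySem.Str.strip line) "[" then
      stripP_go (stripP_consume (deltaB line) rest)
    else line :: stripP_go rest
termination_by ls => ls.length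
decreasing_by
  · exact Nat.lt_succ_of_le (stripP_consume_length _ _)
  · exact Nat.lt_succ_self _

theorem stripP_consume_of_nonpos {d : Int} (h : d ≤ 0) (ls : List String) :
    stripP_consume d ls = ls := by
  cases ls <;> simp [stripP_consume, h]

-- A's flag state machine equals P's block-consuming loop, in both modes.
theorem stripA_eq_stripP (ls : List String) :
    (∀ d : Int, stripA_go ls false d = stripP_go (ls.map PySem.Str.rstrip)) ∧
    (∀ d : Int, 0 < d → stripA_go ls true d = stripP_go (stripP_consume d (ls.map PySem.Str.rstrip))) := by
  induction ls with
  | nil =>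
    constructor
    · intro d; simp [stripA_go, stripP_go]
    · intro d _; simp [stripA_go, stripP_consume, stripP_go]
  | cons raw rest ih =>
    constructor
    · intro d
      simp only [stripA_go, List.map_cons, stripP_go]
      split
      · rename_i hstart
        simp only [Bool.not_false, Bool.true_and] at hstart
        rw [if_pos hstart]
        by_cases hd : (PySem.Str.count (PySem.Str.rstrip raw) "[" : Int) -
            (PySem.Str.count (PySem.Str.rstrip raw) "]" : Int) ≤ 0
        · rw [if_pos hd, ih.1, deltaB, stripP_consume_of_nonpos hd]
        · rw [if_neg hd, ih.2 _ (by omega)]; simp only [deltaB]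
      · rename_i hstart
        simp only [Bool.not_false, Bool.true_and] at hstart
        rw [if_neg hstart]
        simp only [if_neg (Bool.false_ne_true ∘ id)]
        rw [ih.1]
    · intro d hd
      simp only [stripA_go, List.map_cons, stripP_consume, if_neg (by omega : ¬ d ≤ 0)]
      simp only [Bool.not_true, Bool.false_and, Bool.false_eq_true, if_false, if_true]
      set d' : Int := d + ((PySem.Str.count (PySem.Str.rstrip raw) "[" : Int) -
        (PySem.Str.count (PySem.Str.rstrip raw) "]" : Int)) with hd'
      by_cases h2 : d' ≤ 0
      · rw [if_pos h2, ih.1]; simp only [deltaB, ← hd', stripP_consume_of_nonpos h2]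
      · rw [if_neg h2, ih.2 _ (by omega)]; simp only [deltaB, ← hd']

-- Prefix-sum characterization of buildPref.
def prefAt (L : List String) (k : Nat) : Int := ((L.take k).map deltaB).sum

def partials (t : Int) : List String → List Int
  | [] => []
  | l :: r => (t + deltaB l) :: partials (t + deltaB l) r

theorem foldl_partials (ls : List String) (acc : List Int) (t : Int) :
    ls.foldl (fun (st : List Int × Int) l =>
      (st.1 ++ [st.2 + deltaB l], st.2 + deltaB l)) (acc, t)
      = (acc ++ partials t ls, t + ((ls.map deltaB).sum)) := by
  induction ls generalizing acc t with
  | nil => simp [partials]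
  | cons l r ih =>
    simp only [List.foldl_cons, ih, partials, List.map_cons, List.sum_cons]
    rw [Prod.mk.injEq]
    exact ⟨by simp, by ring⟩

theorem buildPref_eq (L : List String) : buildPref L = 0 :: partials 0 L := by
  simp [buildPref, foldl_partials]

theorem partials_getD (L : List String) (t : Int) (k : Nat) (hk : k < L.length) :
    (partials t L).getD k 0 = t + prefAt L (k + 1) := by
  induction L generalizing t k with
  | nil => simp at hk
  | cons l r ih =>
    cases k with
    | zero => simp [partials, prefAt]
    | succ k =>
      simp only [partials, List.getD_cons_succ]
      rw [ih _ k (by simpa using hk)]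
      simp only [prefAt, List.take_succ_cons, List.map_cons, List.sum_cons]
      ring

theorem pref_getD (L : List String) (k : Nat) (hk : k ≤ L.length) :
    (buildPref L).getD k 0 = prefAt L k := by
  rw [buildPref_eq]
  cases k with
  | zero => simp [prefAt]
  | succ k =>
    simp only [List.getD_cons_succ]
    rw [partials_getD L 0 k (by omega)]
    ring

theorem prefAt_succ (L : List String) (k : Nat) (hk : k < L.length) :
    prefAt L (k + 1) = prefAt L k + deltaB (L.getD k "") := by
  have ht : L.take (k + 1) = L.take k ++ [L[k]] := by
    rw [List.take_add_one, List.getElem?_eq_getElem hk]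
    rfl
  have hg : L.getD k "" = L[k] := by
    rw [List.getD_eq_getElem?_getD, List.getElem?_eq_getElem hk]
    rfl
  rw [prefAt, prefAt, ht, hg, List.map_append, List.sum_append]
  simp

-- The inner index scan finds exactly the cut that P's running-depth consumption makes.
theorem consume_eq_findEnd (L : List String) (b : Int) (j : Nat) :
    stripP_consume (prefAt L (j + 1) - b) (L.drop (j + 1))
      = L.drop (stripB_findEnd (buildPref L) L.length b j + 1) := by
  rw [stripB_findEnd]
  split
  · rename_i h
    obtain ⟨hj, hgt⟩ := h
    rw [pref_getD L (j + 1) (by omega)] at hgt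
    by_cases hj1 : j + 1 < L.length
    · have hdrop : L.drop (j + 1) = L[j + 1] :: L.drop (j + 2) :=
        List.drop_eq_getElem_cons hj1
      rw [hdrop]
      simp only [stripP_consume, if_neg (by omega : ¬ prefAt L (j + 1) - b ≤ 0)]
      have hstep : prefAt L (j + 2) = prefAt L (j + 1) + deltaB (L.getD (j + 1) "") :=
        prefAt_succ L (j + 1) hj1
      rw [List.getD_eq_getElem?_getD, List.getElem?_eq_getElem hj1,
        Option.getD_some] at hstep
      have hδ : prefAt L (j + 1) - b + deltaB L[j + 1] = prefAt L (j + 2) - b := by omega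
      rw [hδ]
      exact consume_eq_findEnd L b (j + 1)
    · have hdrop : L.drop (j + 1) = [] := List.drop_eq_nil_of_le (by omega)
      rw [hdrop, stripB_findEnd, dif_neg (fun hc => hj1 hc.1),
        List.drop_eq_nil_of_le (by omega : L.length ≤ j + 1 + 1)]
      simp [stripP_consume]
  · rename_i h
    by_cases hj : j < L.length
    · have hle : prefAt L (j + 1) - b ≤ 0 := by
        have hb := pref_getD L (j + 1) (by omega)
        have hng : ¬ (buildPref L).getD (j + 1) 0 > b := fun hgt => h ⟨hj, hgt⟩
        omega
      rw [stripP_consume_of_nonpos hle]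
    · rw [List.drop_eq_nil_of_le (by omega : L.length ≤ j + 1)]
      simp [stripP_consume]
termination_by L.length - j
decreasing_by all_goals omega

-- B's outer index walk equals P on the corresponding suffix.
set_option maxHeartbeats 1000000 in
theorem stripB_main_eq_stripP (L : List String) (i : Nat) :
    stripB_main L (buildPref L) L.length i = stripP_go (L.drop i) := by
  rw [stripB_main.eq_def]
  split
  · rename_i hi
    have hdrop : L.drop i = L[i] :: L.drop (i + 1) := List.drop_eq_getElem_cons hi
    have hline : L.getD i "" = L[i] := by
      rw [List.getD_eq_getElem?_getD, List.getElem?_eq_getElem hi]; rfl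
    rw [hdrop, stripP_go, hline]
    split
    · -- attribute-start line
      have hC := consume_eq_findEnd L (prefAt L i) i
      have hδ : deltaB L[i] = prefAt L (i + 1) - prefAt L i := by
        have := prefAt_succ L i hi
        rw [hline] at this; omega
      rw [hδ, hC, pref_getD L i (by omega)]
      exact stripB_main_eq_stripP L (stripB_findEnd (buildPref L) L.length (prefAt L i) i + 1)
    · rw [stripB_main_eq_stripP L (i + 1)]
  · rename_i hi
    rw [List.drop_eq_nil_of_le (by omega)]
    simp [stripP_go]
termination_by L.length - i
decreasing_by
  all_goals first
    | omega
    | (have hge := stripB_findEnd_ge (buildPref L) L.length (prefAt L i) i; omega)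

-- ===== VERDICT (by name: the statement is the Claim_ definition above) =====
theorem strip_attributes_py_spec : Claim_equal_strip_attributes_py := by
  intro text _
  unfold Spec_strip_attributes_py strip_attributes_py strip_attributes_py_alt
  show PySem.Str.join "\n" (stripA_go (PySem.Str.splitlines text) false 0)
      = PySem.Str.join "\n"
          (stripB_main ((PySem.Str.splitlines text).map PySem.Str.rstrip)
            (buildPref ((PySem.Str.splitlines text).map PySem.Str.rstrip))
            ((PySem.Str.splitlines text).map PySem.Str.rstrip).length 0)
  rw [(stripA_eq_stripP (PySem.Str.splitlines text)).1 0,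
    stripB_main_eq_stripP ((PySem.Str.splitlines text).map PySem.Str.rstrip) 0,
    List.drop_zero]
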